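-- pv_equiv track=rewrite | github.com/PoojaSingh31github/DSA-Practice | unit4/DSA/backtracking/completeChesboard.py | max_queens_on_board
-- ===== SOURCE A (Python) =====
-- def is_safe(board, row, col, attacked_rows, attacked_cols, attacked_diag1, attacked_diag2, N):
--     if attacked_rows[row] or attacked_cols[col] or attacked_diag1[row - col] or attacked_diag2[row + col]:
--         return False
--     return True
--
-- def place_queens(board, row, attacked_rows, attacked_cols, attacked_diag1, attacked_diag2, N):
--     if row == N:
--         return 0
--
--     max_queens = 0
--     for col in range(N):
--         if board[row][col] == '.' and is_safe(board, row, col, attacked_rows, attacked_cols, attacked_diag1, attacked_diag2, N):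
--             attacked_rows[row] = True
--             attacked_cols[col] = True
--             attacked_diag1[row - col] = True
--             attacked_diag2[row + col] = True
--
--             max_queens = max(max_queens, 1 + place_queens(board, row + 1, attacked_rows, attacked_cols, attacked_diag1, attacked_diag2, N))
--
--             attacked_rows[row] = False
--             attacked_cols[col] = False
--             attacked_diag1[row - col] = False
--             attacked_diag2[row + col] = False
--
--     max_queens = max(max_queens, place_queens(board, row + 1, attacked_rows, attacked_cols, attacked_diag1, attacked_diag2, N))
--
--     return max_queens
--
-- def max_queens_on_board(board, N):
--     attacked_rows = [False] * N
--     attacked_cols = [False] * N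
--     attacked_diag1 = [False] * (2 * N - 1)
--     attacked_diag2 = [False] * (2 * N - 1)
--
--     for i in range(N):
--         for j in range(N):
--             if board[i][j] == 'Q':
--                 attacked_rows[i] = True
--                 attacked_cols[j] = True
--                 attacked_diag1[i - j] = True
--                 attacked_diag2[i + j] = True
--
--     return place_queens(board, 0, attacked_rows, attacked_cols, attacked_diag1, attacked_diag2, N)
-- ===== SOURCE B (Python) =====
-- def max_queens_on_board(board, N):
--     rows, cols, d1, d2 = set(), set(), set(), set()
--     for i in range(N):
--         for j in range(N):
--             if board[i][j] == 'Q':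
--                 rows.add(i); cols.add(j); d1.add(i - j); d2.add(i + j)
--     total = N * N
--
--     def go(k):
--         best = 0
--         for j in range(k, total):
--             r, c = divmod(j, N)
--             if (board[r][c] == '.' and r not in rows and c not in cols
--                     and r - c not in d1 and r + c not in d2):
--                 rows.add(r); cols.add(c); d1.add(r - c); d2.add(r + c)
--                 best = max(best, 1 + go(j + 1))
--                 rows.discard(r); cols.discard(c); d1.discard(r - c); d2.discard(r + c)
--         return best
--
--     return go(0)
-- ===== Notes on version B (the rewrite author's own statement) =====
-- stated objective: alternative
-- what changed: Row-by-row recursion with an inner column loop, an explicit row-skip branch and four mutable boolean arrays (with negative-index wraparound on the diagonal array) is replaced by a 'choose the next queen cell' recursion over a single linear cell index with hash sets of attacked rows/columns/diagonals, whose recursion depth is the number of queens placed.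
import Mathlib
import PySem

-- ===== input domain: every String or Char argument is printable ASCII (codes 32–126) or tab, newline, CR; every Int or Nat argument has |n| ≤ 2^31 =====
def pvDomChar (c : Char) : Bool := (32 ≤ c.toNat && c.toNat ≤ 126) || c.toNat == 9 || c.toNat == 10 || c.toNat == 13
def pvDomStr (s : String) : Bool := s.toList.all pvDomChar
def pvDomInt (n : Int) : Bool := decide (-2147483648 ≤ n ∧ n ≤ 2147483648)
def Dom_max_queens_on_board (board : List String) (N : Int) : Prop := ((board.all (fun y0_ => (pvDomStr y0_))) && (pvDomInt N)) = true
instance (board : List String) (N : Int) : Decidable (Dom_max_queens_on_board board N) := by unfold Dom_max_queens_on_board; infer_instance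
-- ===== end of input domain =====

-- B replaces A's row-by-row recursion (inner column loop + explicit row-skip branch over four
-- mutable boolean arrays with Python's negative-index wraparound on the diagonals) by a
-- 'choose the next queen cell' recursion over a single linear cell index with sets of attacked
-- rows/columns/diagonals; objective: alternative decomposition (no speed claim).

-- ===== PORT A =====
-- board[row][col] (total Option form; both Pythons index the board the same way)
def pvCell (board : List String) (r c : Int) : Option Char :=
  (PySem.List.pyGet? board r).bind (fun s => PySem.Str.pyGet? s c)

-- attacked[i] : Python list read, negative index allowed (in range under Pre_)
def pvGetB (xs : List Bool) (i : Int) : Bool :=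
  PySem.List.pyGetD xs i false

-- attacked[i] = b : Python list assignment with negative-index wraparound
def pvSetB (xs : List Bool) (i : Int) (b : Bool) : List Bool :=
  xs.set (if i < 0 then i + xs.length else i).toNat b

def is_safe_A (row col : Int) (ar ac d1 d2 : List Bool) : Bool :=
  !(pvGetB ar row || pvGetB ac col || pvGetB d1 (row - col) || pvGetB d2 (row + col))

-- fuel = (N - row).toNat at every call under Pre_, so the 0-fuel branch is never taken
def place_queens_A (board : List String) (N : Int) :
    Nat → Int → List Bool → List Bool → List Bool → List Bool → Int
  | fuel, row, ar, ac, d1, d2 =>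
    if row == N then 0
    else
      match fuel with
      | 0 => 0
      | f + 1 =>
        let mq := (PySem.List.pyRange 0 N).foldl (fun mq col =>
          if (pvCell board row col == some '.') && is_safe_A row col ar ac d1 d2 then
            max mq (1 + place_queens_A board N f (row + 1)
              (pvSetB ar row true) (pvSetB ac col true)
              (pvSetB d1 (row - col) true) (pvSetB d2 (row + col) true))
          else mq) 0
        max mq (place_queens_A board N f (row + 1) ar ac d1 d2)

def max_queens_on_board (board : List String) (N : Int) : Int :=
  let init : List Bool × List Bool × List Bool × List Bool :=
    (List.replicate N.toNat false, List.replicate N.toNat false,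
     List.replicate (2 * N - 1).toNat false, List.replicate (2 * N - 1).toNat false)
  let st := (PySem.List.pyRange 0 N).foldl (fun st i =>
    (PySem.List.pyRange 0 N).foldl (fun st j =>
      if pvCell board i j == some 'Q' then
        (pvSetB st.1 i true, pvSetB st.2.1 j true,
         pvSetB st.2.2.1 (i - j) true, pvSetB st.2.2.2 (i + j) true)
      else st) st) init
  place_queens_A board N N.toNat 0 st.1 st.2.1 st.2.2.1 st.2.2.2

-- ===== PORT B =====
-- go(k): scan cells j = k..N*N-1, try each placeable cell as the next queen.
-- fuel = (N*N).toNat + 1 strictly exceeds the recursion depth (k strictly increases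
-- through at most N*N cells), so the 0-fuel branch is never taken.
def pv_go (board : List String) (N : Int) :
    Nat → Int → PySem.Set Int → PySem.Set Int → PySem.Set Int → PySem.Set Int → Int
  | 0, _, _, _, _, _ => 0
  | f + 1, k, rows, cols, s1, s2 =>
    (PySem.List.pyRange k (N * N)).foldl (fun best j =>
      let r := PySem.Int.floordiv j N
      let c := PySem.Int.mod j N
      if (pvCell board r c == some '.') && !(PySem.Set.contains rows r)
          && !(PySem.Set.contains cols c) && !(PySem.Set.contains s1 (r - c))
          && !(PySem.Set.contains s2 (r + c)) then
        max best (1 + pv_go board N f (j + 1) (PySem.Set.add rows r) (PySem.Set.add cols c)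
          (PySem.Set.add s1 (r - c)) (PySem.Set.add s2 (r + c)))
      else best) 0

def max_queens_on_board_alt (board : List String) (N : Int) : Int :=
  let st : PySem.Set Int × PySem.Set Int × PySem.Set Int × PySem.Set Int :=
    (PySem.List.pyRange 0 N).foldl (fun st i =>
      (PySem.List.pyRange 0 N).foldl (fun st j =>
        if pvCell board i j == some 'Q' then
          (PySem.Set.add st.1 i, PySem.Set.add st.2.1 j,
           PySem.Set.add st.2.2.1 (i - j), PySem.Set.add st.2.2.2 (i + j))
        else st) st) (PySem.Set.empty, PySem.Set.empty, PySem.Set.empty, PySem.Set.empty)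
  pv_go board N ((N * N).toNat + 1) 0 st.1 st.2.1 st.2.2.1 st.2.2.2

-- ===== PRECONDITION & SPEC =====
-- Pre_ excludes exactly the inputs where Python A raises: N < 0 (unbounded recursion in
-- place_queens) and boards whose first N rows are missing or shorter than N (IndexError).
def Pre_max_queens_on_board (board : List String) (N : Int) : Prop :=
  0 ≤ N ∧ N ≤ (board.length : Int) ∧ ∀ s ∈ board.take N.toNat, N ≤ (s.toList.length : Int)
instance (board : List String) (N : Int) : Decidable (Pre_max_queens_on_board board N) := by
  unfold Pre_max_queens_on_board; infer_instance

def pvWitness_max_queens_on_board : List String × Int := (["..", ".."], 2)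

def Spec_max_queens_on_board (board : List String) (N : Int) (out : Int) : Prop := out = max_queens_on_board_alt board N
instance (board : List String) (N : Int) (out : Int) : Decidable (Spec_max_queens_on_board board N out) := by unfold Spec_max_queens_on_board; infer_instance

-- ===== CLAIM (what is proved, stated in full; the proofs are below) =====
def Claim_equal_max_queens_on_board : Prop := ∀ (board : List String) (N : Int), Dom_max_queens_on_board board N → Pre_max_queens_on_board board N → Spec_max_queens_on_board board N (max_queens_on_board board N)

-- ===== LEMMAS AND PROOFS =====

-- the loop bodies of the two searches, as named functions (definitionally the ports' lambdas)
def pvBodyA (board : List String) (N : Int) (f : Nat) (row : Int)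
    (ar ac d1 d2 : List Bool) : Int → Int → Int :=
  fun mq col =>
    if (pvCell board row col == some '.') && is_safe_A row col ar ac d1 d2 then
      max mq (1 + place_queens_A board N f (row + 1)
        (pvSetB ar row true) (pvSetB ac col true)
        (pvSetB d1 (row - col) true) (pvSetB d2 (row + col) true))
    else mq

def pvBodyB (board : List String) (N : Int) (f : Nat)
    (rows cols s1 s2 : PySem.Set Int) : Int → Int → Int :=
  fun best j =>
    if (pvCell board (PySem.Int.floordiv j N) (PySem.Int.mod j N) == some '.')
        && !(PySem.Set.contains rows (PySem.Int.floordiv j N))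
        && !(PySem.Set.contains cols (PySem.Int.mod j N))
        && !(PySem.Set.contains s1 (PySem.Int.floordiv j N - PySem.Int.mod j N))
        && !(PySem.Set.contains s2 (PySem.Int.floordiv j N + PySem.Int.mod j N)) then
      max best (1 + pv_go board N f (j + 1)
        (PySem.Set.add rows (PySem.Int.floordiv j N))
        (PySem.Set.add cols (PySem.Int.mod j N))
        (PySem.Set.add s1 (PySem.Int.floordiv j N - PySem.Int.mod j N))
        (PySem.Set.add s2 (PySem.Int.floordiv j N + PySem.Int.mod j N)))
    else best

lemma pv_go_succ (board : List String) (N : Int) (f : Nat) (k : Int)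
    (rows cols s1 s2 : PySem.Set Int) :
    pv_go board N (f + 1) k rows cols s1 s2
      = (PySem.List.pyRange k (N * N)).foldl (pvBodyB board N f rows cols s1 s2) 0 := rfl

lemma place_succ (board : List String) (N : Int) (f : Nat) (row : Int)
    (ar ac d1 d2 : List Bool) (h : ¬ row = N) :
    place_queens_A board N (f + 1) row ar ac d1 d2
      = max ((PySem.List.pyRange 0 N).foldl (pvBodyA board N f row ar ac d1 d2) 0)
          (place_queens_A board N f (row + 1) ar ac d1 d2) := by
  conv_lhs => rw [place_queens_A]
  rw [if_neg (by simpa using h)]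
  rfl

-- state correspondence: boolean attack arrays (A) ↔ attack sets (B)
def pvSR (N : Int) (ar ac d1 d2 : List Bool) (rows cols s1 s2 : PySem.Set Int) : Prop :=
  ar.length = N.toNat ∧ ac.length = N.toNat ∧
  d1.length = (2 * N - 1).toNat ∧ d2.length = (2 * N - 1).toNat ∧
  (∀ i : Int, 0 ≤ i → i < N → pvGetB ar i = PySem.Set.contains rows i) ∧
  (∀ i : Int, 0 ≤ i → i < N → pvGetB ac i = PySem.Set.contains cols i) ∧
  (∀ d : Int, -N < d → d < N → pvGetB d1 d = PySem.Set.contains s1 d) ∧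
  (∀ d : Int, 0 ≤ d → d < 2 * N - 1 → pvGetB d2 d = PySem.Set.contains s2 d)

lemma pv_foldl_rel {α β γ : Type} (R : α → β → Prop) (f : α → γ → α) (g : β → γ → β) :
    ∀ (l : List γ) (a : α) (b : β), R a b →
      (∀ x ∈ l, ∀ a b, R a b → R (f a x) (g b x)) → R (l.foldl f a) (l.foldl g b) := by
  intro l
  induction l with
  | nil => intro a b hab _; exact hab
  | cons x t ih =>
    intro a b hab hstep
    exact ih _ _ (hstep x (by simp) a b hab) (fun y hy => hstep y (by simp [hy]))

lemma pv_foldl_max (body : Int → Int → Int) (hb : ∀ x y j, body (max x y) j = max x (body y j)) :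
    ∀ (l : List Int) (a b : Int), l.foldl body (max a b) = max a (l.foldl body b) := by
  intro l
  induction l with
  | nil => intro a b; rfl
  | cons x t ih => intro a b; simp only [List.foldl]; rw [hb, ih]

lemma pv_foldl_le (body : Int → Int → Int) (hb : ∀ x j, x ≤ body x j) :
    ∀ (l : List Int) (a : Int), a ≤ l.foldl body a := by
  intro l
  induction l with
  | nil => intro a; simp
  | cons x t ih => intro a; exact le_trans (hb a x) (ih (body a x))

lemma pv_length_pvSetB (xs : List Bool) (i : Int) (b : Bool) :
    (pvSetB xs i b).length = xs.length := by simp [pvSetB]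

def pvNorm (n : Nat) (i : Int) : Nat := (if i < 0 then i + n else i).toNat

lemma pvGetB_norm (xs : List Bool) (i : Int) (h0 : -(xs.length : Int) ≤ i)
    (h1 : i < (xs.length : Int)) :
    pvGetB xs i = xs.getD (pvNorm xs.length i) false := by
  unfold pvGetB PySem.List.pyGetD PySem.List.pyGet? PySem.List.pyIdx? pvNorm
  split_ifs <;> try omega
  all_goals rw [List.getD_eq_getElem?_getD]
  all_goals first
    | rfl
    | (have h2 : xs.length - (-i).toNat = (i + xs.length).toNat := by omega
       rw [h2]; rfl)

lemma pvGetB_set_self (xs : List Bool) (i : Int) (b : Bool)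
    (h0 : -(xs.length : Int) ≤ i) (h1 : i < (xs.length : Int)) :
    pvGetB (pvSetB xs i b) i = b := by
  have hlen : (pvSetB xs i b).length = xs.length := by simp [pvSetB]
  rw [pvGetB_norm _ _ (by omega) (by omega)]
  show (xs.set (pvNorm xs.length i) b).getD (pvNorm (pvSetB xs i b).length i) false = b
  rw [hlen]
  have hn : pvNorm xs.length i < xs.length := by unfold pvNorm; omega
  rw [List.getD_eq_getElem?_getD, List.getElem?_set_self (by simpa using hn)]
  rfl

lemma pvGetB_set_ne (xs : List Bool) (i i' : Int) (b : Bool)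
    (_h0 : -(xs.length : Int) ≤ i) (_h1 : i < (xs.length : Int))
    (h0' : -(xs.length : Int) ≤ i') (h1' : i' < (xs.length : Int))
    (hne : pvNorm xs.length i ≠ pvNorm xs.length i') :
    pvGetB (pvSetB xs i b) i' = pvGetB xs i' := by
  have hlen : (pvSetB xs i b).length = xs.length := by simp [pvSetB]
  rw [pvGetB_norm _ _ (by omega) (by omega), pvGetB_norm _ _ h0' h1']
  show (xs.set (pvNorm xs.length i) b).getD (pvNorm (pvSetB xs i b).length i') false = _
  rw [hlen, List.getD_eq_getElem?_getD, List.getD_eq_getElem?_getD,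
      List.getElem?_set_ne hne]

lemma pvGetB_replicate (n : Nat) (i : Int) : pvGetB (List.replicate n false) i = false := by
  unfold pvGetB PySem.List.pyGetD PySem.List.pyGet? PySem.List.pyIdx?
  split_ifs <;> simp [List.getElem?_replicate]
  · split_ifs <;> rfl
  · split_ifs <;> rfl

lemma pv_contains_add_ne {s : PySem.Set Int} {x y : Int} (hne : y ≠ x) :
    PySem.Set.contains (PySem.Set.add s x) y = PySem.Set.contains s y := by
  rcases h : PySem.Set.contains s y with _ | _
  · rcases h2 : PySem.Set.contains (PySem.Set.add s x) y with _ | _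
    · rfl
    · rw [PySem.Set.contains_iff, PySem.Set.mem_add] at h2
      rcases h2 with h2 | h2
      · rw [← PySem.Set.contains_iff] at h2; rw [h] at h2; exact absurd h2 (by simp)
      · exact absurd h2 hne
  · rw [PySem.Set.contains_iff] at h
    rw [PySem.Set.contains_iff, PySem.Set.mem_add]
    left; exact h

lemma pv_contains_add_self (s : PySem.Set Int) (x : Int) :
    PySem.Set.contains (PySem.Set.add s x) x = true := by
  rw [PySem.Set.contains_iff, PySem.Set.mem_add]; right; rfl

lemma pvSR_mark (N r c : Int) (hr0 : 0 ≤ r) (hrN : r < N) (hc0 : 0 ≤ c) (hcN : c < N)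
    (ar ac d1 d2 : List Bool) (rows cols s1 s2 : PySem.Set Int)
    (h : pvSR N ar ac d1 d2 rows cols s1 s2) :
    pvSR N (pvSetB ar r true) (pvSetB ac c true) (pvSetB d1 (r - c) true) (pvSetB d2 (r + c) true)
      (PySem.Set.add rows r) (PySem.Set.add cols c)
      (PySem.Set.add s1 (r - c)) (PySem.Set.add s2 (r + c)) := by
  obtain ⟨l1, l2, l3, l4, p1, p2, p3, p4⟩ := h
  have hN0 : 0 < N := lt_of_le_of_lt hr0 hrN
  refine ⟨by simp [pv_length_pvSetB, l1], by simp [pv_length_pvSetB, l2],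
    by simp [pv_length_pvSetB, l3], by simp [pv_length_pvSetB, l4], ?_, ?_, ?_, ?_⟩
  · intro i hi0 hiN
    by_cases hir : i = r
    · subst hir
      rw [pvGetB_set_self _ _ _ (by rw [l1]; omega) (by rw [l1]; omega), pv_contains_add_self]
    · rw [pvGetB_set_ne _ _ _ _ (by rw [l1]; omega) (by rw [l1]; omega)
        (by rw [l1]; omega) (by rw [l1]; omega)
        (by unfold pvNorm; rw [l1]; split_ifs <;> omega),
        p1 i hi0 hiN, pv_contains_add_ne hir]
  · intro i hi0 hiN
    by_cases hic : i = c
    · subst hic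
      rw [pvGetB_set_self _ _ _ (by rw [l2]; omega) (by rw [l2]; omega), pv_contains_add_self]
    · rw [pvGetB_set_ne _ _ _ _ (by rw [l2]; omega) (by rw [l2]; omega)
        (by rw [l2]; omega) (by rw [l2]; omega)
        (by unfold pvNorm; rw [l2]; split_ifs <;> omega),
        p2 i hi0 hiN, pv_contains_add_ne hic]
  · intro d hd0 hdN
    by_cases hdd : d = r - c
    · subst hdd
      rw [pvGetB_set_self _ _ _ (by rw [l3]; omega) (by rw [l3]; omega), pv_contains_add_self]
    · rw [pvGetB_set_ne _ _ _ _ (by rw [l3]; omega) (by rw [l3]; omega)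
        (by rw [l3]; omega) (by rw [l3]; omega)
        (by unfold pvNorm; rw [l3]; split_ifs <;> omega),
        p3 d hd0 hdN, pv_contains_add_ne hdd]
  · intro d hd0 hdN
    by_cases hdd : d = r + c
    · subst hdd
      rw [pvGetB_set_self _ _ _ (by rw [l4]; omega) (by rw [l4]; omega), pv_contains_add_self]
    · rw [pvGetB_set_ne _ _ _ _ (by rw [l4]; omega) (by rw [l4]; omega)
        (by rw [l4]; omega) (by rw [l4]; omega)
        (by unfold pvNorm; rw [l4]; split_ifs <;> omega),
        p4 d hd0 hdN, pv_contains_add_ne hdd]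

lemma pvSR_init (N : Int) (hN : 0 ≤ N) :
    pvSR N (List.replicate N.toNat false) (List.replicate N.toNat false)
      (List.replicate (2 * N - 1).toNat false) (List.replicate (2 * N - 1).toNat false)
      [] [] [] [] := by
  refine ⟨by simp, by simp, by simp, by simp, ?_, ?_, ?_, ?_⟩ <;>
    (intro i _ _; rw [pvGetB_replicate]; rfl)

lemma pv_stable (board : List String) (N : Int) :
    ∀ (f f' : Nat) (k : Int) (rows cols s1 s2 : PySem.Set Int),
      (N * N - k).toNat < f → (N * N - k).toNat < f' →
      pv_go board N f k rows cols s1 s2 = pv_go board N f' k rows cols s1 s2 := by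
  intro f
  induction f with
  | zero => intro f' k rows cols s1 s2 h h'; omega
  | succ f ih =>
    intro f' k rows cols s1 s2 h h'
    obtain ⟨g', rfl⟩ : ∃ g', f' = g' + 1 := ⟨f' - 1, by omega⟩
    rw [pv_go_succ, pv_go_succ]
    apply PySem.List.foldl_congr_mem
    intro acc j hj
    obtain ⟨hj1, hj2⟩ := PySem.List.mem_pyRange_one.mp hj
    unfold pvBodyB
    split_ifs with hc
    · rw [ih g' (j + 1) _ _ _ _ (by omega) (by omega)]
    · rfl

lemma pv_skip (board : List String) (N : Int) (hN : 0 < N) (f : Nat) (row a : Int)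
    (hra : row * N ≤ a) (hab : a ≤ (row + 1) * N) (hb : (row + 1) * N ≤ N * N)
    (rows cols s1 s2 : PySem.Set Int) (hrow : PySem.Set.contains rows row = true) :
    pv_go board N f a rows cols s1 s2 = pv_go board N f ((row + 1) * N) rows cols s1 s2 := by
  cases f with
  | zero => rfl
  | succ f =>
    rw [pv_go_succ, pv_go_succ,
      PySem.List.pyRange_one_append a ((row + 1) * N) (N * N) hab hb, List.foldl_append]
    congr 1
    have hpre : ∀ (acc : Int), ∀ j ∈ PySem.List.pyRange a ((row + 1) * N),
        pvBodyB board N f rows cols s1 s2 acc j = (fun acc _ => acc) acc j := by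
      intro acc j hj
      obtain ⟨hj1, hj2⟩ := PySem.List.mem_pyRange_one.mp hj
      have hfd : PySem.Int.floordiv j N = row :=
        (PySem.Int.floordiv_eq_iff_of_pos hN).mpr ⟨le_trans hra hj1, hj2⟩
      unfold pvBodyB
      rw [hfd, hrow]
      simp
    rw [PySem.List.foldl_congr_mem _ _ _ _ hpre, PySem.List.foldl_ignore]

lemma pv_inner (board : List String) (N : Int) (hN : 0 < N) (row : Int)
    (hr0 : 0 ≤ row) (hrN : row < N) (g h : Nat)
    (ar ac d1 d2 : List Bool) (rows cols s1 s2 : PySem.Set Int)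
    (hSR : pvSR N ar ac d1 d2 rows cols s1 s2)
    (Hcont : ∀ ar' ac' d1' d2' rows' cols' s1' s2', pvSR N ar' ac' d1' d2' rows' cols' s1' s2' →
        pv_go board N h ((row + 1) * N) rows' cols' s1' s2'
          = place_queens_A board N g (row + 1) ar' ac' d1' d2') :
    ∀ (t : Nat) (c : Int), 0 ≤ c → c ≤ N → (N - c).toNat = t → ∀ acc : Int,
      (PySem.List.pyRange (row * N + c) ((row + 1) * N)).foldl (pvBodyB board N h rows cols s1 s2) acc
        = (PySem.List.pyRange c N).foldl (pvBodyA board N g row ar ac d1 d2) acc := by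
  have hrN1 : (row + 1) * N = row * N + N := by ring
  have hb2 : (row + 1) * N ≤ N * N := by
    have h1 : 0 ≤ (N - (row + 1)) * N := mul_nonneg (by omega) (by omega)
    have h2 : (N - (row + 1)) * N = N * N - (row + 1) * N := by ring
    omega
  intro t
  induction t with
  | zero =>
    intro c hc0 hcN ht acc
    have hcN' : N = c := by omega
    subst hcN'
    rw [PySem.List.pyRange_one_eq_nil (by omega), PySem.List.pyRange_one_eq_nil (le_refl N)]
    rfl
  | succ t ih =>
    intro c hc0 hcN ht acc
    have hcltN : c < N := by omega
    rw [PySem.List.pyRange_one_cons (by omega : row * N + c < (row + 1) * N),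
        PySem.List.pyRange_one_cons hcltN]
    simp only [List.foldl_cons]
    have hfd : PySem.Int.floordiv (row * N + c) N = row :=
      (PySem.Int.floordiv_eq_iff_of_pos hN).mpr ⟨by omega, by omega⟩
    have hmd : PySem.Int.mod (row * N + c) N = c := by
      have hh := PySem.Int.floordiv_mul_add_mod (row * N + c) N
      rw [hfd] at hh
      omega
    have hstep : pvBodyB board N h rows cols s1 s2 acc (row * N + c)
        = pvBodyA board N g row ar ac d1 d2 acc c := by
      obtain ⟨l1, l2, l3, l4, p1, p2, p3, p4⟩ := hSR
      unfold pvBodyB pvBodyA is_safe_A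
      rw [hfd, hmd]
      rw [p1 row hr0 hrN, p2 c hc0 hcltN, p3 (row - c) (by omega) (by omega),
          p4 (row + c) (by omega) (by omega)]
      have hcond : ∀ (e b1 b2 b3 b4 : Bool),
          (e && !b1 && !b2 && !b3 && !b4) = (e && !(b1 || b2 || b3 || b4)) := by decide
      rw [hcond]
      split_ifs with hcnd
      · rw [pv_skip board N hN h row (row * N + c + 1) (by omega) (by omega) hb2
            _ _ _ _ (pv_contains_add_self rows row)]
        rw [Hcont _ _ _ _ _ _ _ _
            (pvSR_mark N row c hr0 hrN hc0 hcltN _ _ _ _ _ _ _ _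
              ⟨l1, l2, l3, l4, p1, p2, p3, p4⟩)]
      · rfl
    rw [hstep]
    have hassoc : row * N + c + 1 = row * N + (c + 1) := by ring
    rw [hassoc]
    exact ih (c + 1) (by omega) (by omega) (by omega) _

lemma pv_main (board : List String) (N : Int) (hN : 0 ≤ N) :
    ∀ (g : Nat) (row : Int), 0 ≤ row → row ≤ N → (N - row).toNat = g →
    ∀ (fb : Nat), (N * N - row * N).toNat + 1 ≤ fb →
    ∀ (ar ac d1 d2 : List Bool) (rows cols s1 s2 : PySem.Set Int),
      pvSR N ar ac d1 d2 rows cols s1 s2 →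
      pv_go board N fb (row * N) rows cols s1 s2 = place_queens_A board N g row ar ac d1 d2 := by
  intro g
  induction g with
  | zero =>
    intro row hr0 hrN ht fb hfb ar ac d1 d2 rows cols s1 s2 hSR
    have hrow : N = row := by omega
    subst hrow
    obtain ⟨fb', rfl⟩ : ∃ fb', fb = fb' + 1 := ⟨fb - 1, by omega⟩
    rw [pv_go_succ, PySem.List.pyRange_one_eq_nil (le_refl (N * N))]
    simp [place_queens_A]
  | succ g ih =>
    intro row hr0 hrN ht fb hfb ar ac d1 d2 rows cols s1 s2 hSR
    have hrow : row < N := by omega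
    have hN : 0 < N := by omega
    have hr1 : (row + 1) * N = row * N + N := by ring
    have hb2 : (row + 1) * N ≤ N * N := by
      have h1 : 0 ≤ (N - (row + 1)) * N := mul_nonneg (by omega) (by omega)
      have h2 : (N - (row + 1)) * N = N * N - (row + 1) * N := by ring
      omega
    have hge : N ≤ N * N - row * N := by
      have h1 : (1 : Int) * N ≤ (N - row) * N :=
        mul_le_mul_of_nonneg_right (by omega) (le_of_lt hN)
      have h2 : (N - row) * N = N * N - row * N := by ring
      omega
    obtain ⟨fb', rfl⟩ : ∃ fb', fb = fb' + 1 := ⟨fb - 1, by omega⟩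
    have Hcont : ∀ ar' ac' d1' d2' rows' cols' s1' s2',
        pvSR N ar' ac' d1' d2' rows' cols' s1' s2' →
        pv_go board N fb' ((row + 1) * N) rows' cols' s1' s2'
          = place_queens_A board N g (row + 1) ar' ac' d1' d2' := by
      intro ar' ac' d1' d2' rows' cols' s1' s2' hSR'
      rw [pv_stable board N fb' ((N * N - (row + 1) * N).toNat + 1) ((row + 1) * N)
          _ _ _ _ (by omega) (by omega)]
      exact ih (row + 1) (by omega) (by omega) (by omega) _ (le_refl _) _ _ _ _ _ _ _ _ hSR'
    rw [pv_go_succ, place_succ board N g row ar ac d1 d2 (by omega),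
        PySem.List.pyRange_one_append (row * N) ((row + 1) * N) (N * N) (by omega) hb2,
        List.foldl_append]
    have hbm : ∀ x y j, pvBodyB board N fb' rows cols s1 s2 (max x y) j
        = max x (pvBodyB board N fb' rows cols s1 s2 y j) := by
      intro x y j
      unfold pvBodyB
      split_ifs
      · exact max_assoc x y _
      · rfl
    have hnonneg : (0 : Int) ≤
        (PySem.List.pyRange (row * N) ((row + 1) * N)).foldl
          (pvBodyB board N fb' rows cols s1 s2) 0 := by
      apply pv_foldl_le
      intro x j
      unfold pvBodyB
      split_ifs
      · exact le_max_left _ _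
      · exact le_refl x
    have hsuffix :
        (PySem.List.pyRange ((row + 1) * N) (N * N)).foldl
            (pvBodyB board N fb' rows cols s1 s2)
            ((PySem.List.pyRange (row * N) ((row + 1) * N)).foldl
              (pvBodyB board N fb' rows cols s1 s2) 0)
          = max ((PySem.List.pyRange (row * N) ((row + 1) * N)).foldl
                (pvBodyB board N fb' rows cols s1 s2) 0)
              (place_queens_A board N g (row + 1) ar ac d1 d2) := by
      conv_lhs =>
        rw [show ((PySem.List.pyRange (row * N) ((row + 1) * N)).foldl
              (pvBodyB board N fb' rows cols s1 s2) 0)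
            = max ((PySem.List.pyRange (row * N) ((row + 1) * N)).foldl
              (pvBodyB board N fb' rows cols s1 s2) 0) 0 from (max_eq_left hnonneg).symm]
      rw [pv_foldl_max _ hbm _ _ 0, ← pv_go_succ,
          pv_stable board N (fb' + 1) ((N * N - (row + 1) * N).toNat + 1) ((row + 1) * N)
            _ _ _ _ (by omega) (by omega)]
      rw [ih (row + 1) (by omega) (by omega) (by omega) _ (le_refl _) _ _ _ _ _ _ _ _ hSR]
    rw [hsuffix]
    congr 1
    have hin := pv_inner board N hN row hr0 hrow g fb' ar ac d1 d2 rows cols s1 s2 hSR Hcont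
      ((N - 0).toNat) 0 (le_refl 0) (le_of_lt hN) rfl 0
    simpa using hin

-- ===== VERDICT (by name: the statement is the Claim_ definition above) =====
theorem max_queens_on_board_spec : Claim_equal_max_queens_on_board := by
  intro board N _ hpre
  obtain ⟨hN, -, -⟩ := hpre
  show max_queens_on_board board N = max_queens_on_board_alt board N
  have hseed := pv_foldl_rel
    (fun (a : List Bool × List Bool × List Bool × List Bool)
         (b : PySem.Set Int × PySem.Set Int × PySem.Set Int × PySem.Set Int) =>
       pvSR N a.1 a.2.1 a.2.2.1 a.2.2.2 b.1 b.2.1 b.2.2.1 b.2.2.2)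
    (fun st i => (PySem.List.pyRange 0 N).foldl (fun st j =>
      if pvCell board i j == some 'Q' then
        (pvSetB st.1 i true, pvSetB st.2.1 j true,
         pvSetB st.2.2.1 (i - j) true, pvSetB st.2.2.2 (i + j) true)
      else st) st)
    (fun st i => (PySem.List.pyRange 0 N).foldl (fun st j =>
      if pvCell board i j == some 'Q' then
        (PySem.Set.add st.1 i, PySem.Set.add st.2.1 j,
         PySem.Set.add st.2.2.1 (i - j), PySem.Set.add st.2.2.2 (i + j))
      else st) st)
    (PySem.List.pyRange 0 N)
    (List.replicate N.toNat false, List.replicate N.toNat false,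
     List.replicate (2 * N - 1).toNat false, List.replicate (2 * N - 1).toNat false)
    (PySem.Set.empty, PySem.Set.empty, PySem.Set.empty, PySem.Set.empty)
    (pvSR_init N hN)
    (by
      intro i hi a b hab
      obtain ⟨hi1, hi2⟩ := PySem.List.mem_pyRange_one.mp hi
      exact pv_foldl_rel
        (fun (a : List Bool × List Bool × List Bool × List Bool)
             (b : PySem.Set Int × PySem.Set Int × PySem.Set Int × PySem.Set Int) =>
           pvSR N a.1 a.2.1 a.2.2.1 a.2.2.2 b.1 b.2.1 b.2.2.1 b.2.2.2)
        _ _ _ _ _ hab (by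
          intro j hj a' b' hab'
          obtain ⟨hj1, hj2⟩ := PySem.List.mem_pyRange_one.mp hj
          split_ifs with hq
          · exact pvSR_mark N i j hi1 hi2 hj1 hj2 _ _ _ _ _ _ _ _ hab'
          · exact hab'))
  have hmain := pv_main board N hN N.toNat 0 le_rfl hN (by simp) ((N * N).toNat + 1)
    (by simp) _ _ _ _ _ _ _ _ hseed
  rw [zero_mul] at hmain
  exact hmain.symm
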